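-- pv_equiv track=rewrite | github.com/plellouche/HW5_507 | hwMusic_final.py | biSearchArtist
-- ===== SOURCE A (Python) =====
-- def biSearchArtist(array_2d, artist):
--     array_2d.sort(key=lambda x: x[0])
--
--     left, right = 0, len(array_2d) - 1
--
--     while left <= right:
--         mid = (left + right) // 2
--         if array_2d[mid][0] == artist:
--             return mid
--         elif array_2d[mid][0] < artist:
--             left = mid + 1
--         else:
--             right = mid - 1
--     return -1
-- ===== SOURCE B (Python) =====
-- def biSearchArtist(array_2d, artist):
--     # Same in-place sort as A; then a single linear scan instead of binary search.
--     array_2d.sort(key=lambda x: x[0])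
--     for i, row in enumerate(array_2d):
--         if row[0] == artist:
--             return i
--     return -1
-- ===== Notes on version B (the rewrite author's own statement) =====
-- stated objective: simpler
-- what changed: B keeps the in-place sort but replaces the iterative binary search with a single linear scan returning the first row whose artist matches; Pre_ excludes lists with empty rows (A raises IndexError) and lists in which the artist's key occurs more than once, where A's returned index among the equal keys is an artefact of the mid sequence.
-- outside the precondition, e.g. on biSearchArtist([['a'], ['a'], ['a']], 'a'): A returns 1, B returns 0
import Mathlib
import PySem

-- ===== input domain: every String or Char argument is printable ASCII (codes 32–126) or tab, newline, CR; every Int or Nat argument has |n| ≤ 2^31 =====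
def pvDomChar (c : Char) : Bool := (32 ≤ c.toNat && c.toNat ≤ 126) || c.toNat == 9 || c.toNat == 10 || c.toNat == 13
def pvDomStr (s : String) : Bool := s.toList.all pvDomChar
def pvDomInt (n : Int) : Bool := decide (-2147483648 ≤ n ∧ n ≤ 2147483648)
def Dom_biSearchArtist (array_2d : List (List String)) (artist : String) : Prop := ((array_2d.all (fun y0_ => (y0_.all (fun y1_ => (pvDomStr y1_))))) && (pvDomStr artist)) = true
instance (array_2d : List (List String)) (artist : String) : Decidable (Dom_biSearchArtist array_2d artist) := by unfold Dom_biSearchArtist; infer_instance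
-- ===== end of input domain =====

-- B replaces A's iterative binary search by a linear scan after the same sort (objective: simpler).
-- Both A and B sort array_2d in place (same mutation); the equivalence below is about the return value.

-- ===== PORT A =====
-- while left <= right: … (fuel = length + 1 bounds the iteration count; the loop shrinks right-left each step)
def pvLoopA (s : List (List String)) (artist : String) (left right : Int) : Nat → Int
  | 0 => -1
  | fuel + 1 =>
    if left ≤ right then
      let mid := PySem.Int.floordiv (left + right) 2
      let key := (PySem.List.pyGetD s mid []).headD ""   -- array_2d[mid][0]; rows are nonempty under Pre_
      if key == artist then mid
      else if key < artist then pvLoopA s artist (mid + 1) right fuel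
      else pvLoopA s artist left (mid - 1) fuel
    else -1

def biSearchArtist (array_2d : List (List String)) (artist : String) : Int :=
  let s := PySem.List.sorted array_2d (fun x => x.headD "") false
  pvLoopA s artist 0 ((s.length : Int) - 1) (s.length + 1)

-- ===== PORT B =====
-- for i, row in enumerate(sorted rows): if row[0] == artist: return i; return -1
def pvScanB (s : List (List String)) (artist : String) (i : Int) : Int :=
  match s with
  | [] => -1
  | r :: rs => if r.headD "" == artist then i else pvScanB rs artist (i + 1)

def biSearchArtist_alt (array_2d : List (List String)) (artist : String) : Int :=
  pvScanB (PySem.List.sorted array_2d (fun x => x.headD "") false) artist 0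

-- ===== PRECONDITION & SPEC =====
-- Pre_ excludes lists with an empty row (there A raises IndexError, and so does B) and lists in which
-- the artist's key occurs in more than one row: which of the equal keys' indices A returns is an
-- accident of the binary-search mid sequence, while B returns the first.
def Pre_biSearchArtist (array_2d : List (List String)) (artist : String) : Prop :=
  (∀ r ∈ array_2d, r ≠ []) ∧ array_2d.countP (fun r => r.headD "" == artist) ≤ 1
instance (array_2d : List (List String)) (artist : String) : Decidable (Pre_biSearchArtist array_2d artist) := by unfold Pre_biSearchArtist; infer_instance

def pvWitness_biSearchArtist : List (List String) × String := ([["b", "x"], ["a", "y"]], "a")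

def Spec_biSearchArtist (array_2d : List (List String)) (artist : String) (out : Int) : Prop := out = biSearchArtist_alt array_2d artist
instance (array_2d : List (List String)) (artist : String) (out : Int) : Decidable (Spec_biSearchArtist array_2d artist out) := by unfold Spec_biSearchArtist; infer_instance

-- ===== CLAIM (what is proved, stated in full; the proofs are below) =====
def Claim_equal_biSearchArtist : Prop := ∀ (array_2d : List (List String)) (artist : String), Dom_biSearchArtist array_2d artist → Pre_biSearchArtist array_2d artist → Spec_biSearchArtist array_2d artist (biSearchArtist array_2d artist)

-- ===== LEMMAS AND PROOFS =====

-- In a list with at most one match of p, any two matching positions coincide.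
theorem pv_uniq_idx {α : Type} (p : α → Bool) :
    ∀ (s : List α), s.countP p ≤ 1 → ∀ i j (hi : i < s.length) (hj : j < s.length),
      p s[i] = true → p s[j] = true → i = j := by
  intro s
  induction s with
  | nil => intro _ i j hi; simp at hi
  | cons x xs ih =>
    intro hc i j hi hj hpi hpj
    rw [List.countP_cons] at hc
    match i, j with
    | 0, 0 => rfl
    | 0, j + 1 =>
      exfalso
      have hj' : j < xs.length := by simpa using hj
      simp at hpi hpj
      have h1 : 0 < xs.countP p := List.countP_pos_iff.2 ⟨xs[j]'hj', List.getElem_mem hj', hpj⟩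
      rw [if_pos hpi] at hc; omega
    | i + 1, 0 =>
      exfalso
      have hi' : i < xs.length := by simpa using hi
      simp at hpi hpj
      have h1 : 0 < xs.countP p := List.countP_pos_iff.2 ⟨xs[i]'hi', List.getElem_mem hi', hpi⟩
      rw [if_pos hpj] at hc; omega
    | i + 1, j + 1 =>
      simp at hpi hpj
      have := ih (by omega) i j (by simpa using hi) (by simpa using hj) hpi hpj
      omega

-- pvScanB in terms of findIdx?.
theorem pvScanB_eq_findIdx (artist : String) :
    ∀ (s : List (List String)) (i : Int),
      pvScanB s artist i = match s.findIdx? (fun r => r.headD "" == artist) with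
                          | some j => i + (j : Int)
                          | none => -1 := by
  intro s
  induction s with
  | nil => intro i; simp [pvScanB]
  | cons r rs ih =>
    intro i
    rw [List.findIdx?_cons]
    simp only [pvScanB]
    by_cases h : (r.headD "" == artist) = true
    · rw [if_pos h, if_pos h]
      simp
    · rw [if_neg h, if_neg h, ih (i + 1)]
      rcases hf : rs.findIdx? (fun r => r.headD "" == artist) with _ | j
      · rw [hf]
        rfl
      · rw [hf]
        simp only [Option.map_some]
        push_cast
        ring

-- The binary-search loop computes findIdx? on a key-monotone list with at most one match.
theorem pvLoopA_eq (s : List (List String)) (artist : String)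
    (hmono : ∀ p q : Nat, (hpq : p ≤ q) → (hq : q < s.length) →
        (s[p]'(by omega)).headD "" ≤ (s[q]'hq).headD "")
    (hc : s.countP (fun r => r.headD "" == artist) ≤ 1) :
    ∀ (fuel : Nat) (left right : Int),
      0 ≤ left → right ≤ (s.length : Int) - 1 →
      (∀ k : Nat, (hk : k < s.length) → (s[k]'hk).headD "" = artist → left ≤ (k : Int) ∧ (k : Int) ≤ right) →
      (right - left + 1).toNat ≤ fuel →
      pvLoopA s artist left right fuel =
        (match s.findIdx? (fun r => r.headD "" == artist) with
         | some j => (j : Int)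
         | none => -1) := by
  intro fuel
  induction fuel with
  | zero =>
    intro left right h0 hlen hconf hfuel
    rcases hf : s.findIdx? (fun r => r.headD "" == artist) with _ | j
    · simp only [pvLoopA, hf]
    · exfalso
      obtain ⟨hjlt, hpj, -⟩ := List.findIdx?_eq_some_iff_getElem.1 hf
      have := hconf j hjlt (by simpa using hpj)
      omega
  | succ fuel ih =>
    intro left right h0 hlen hconf hfuel
    by_cases hlr : left ≤ right
    · obtain ⟨hm1, hm2⟩ := PySem.Int.floordiv_two_mid_bounds hlr
      set mid := PySem.Int.floordiv (left + right) 2 with hmiddef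
      have hlenpos : 0 < s.length := by omega
      have hmlt : mid < (s.length : Int) := by omega
      have hmid0 : 0 ≤ mid := by omega
      have hmnat : ((mid.toNat : Int)) = mid := Int.toNat_of_nonneg hmid0
      have hmltn : mid.toNat < s.length := by omega
      have hget : PySem.List.pyGetD s mid [] = s[mid.toNat] :=
        PySem.List.pyGetD_eq_getElem s [] hmid0 hmlt
      by_cases hkey : ((s[mid.toNat]'hmltn).headD "" == artist) = true
      · -- found at mid
        have heq : (s[mid.toNat]'hmltn).headD "" = artist := by simpa using hkey
        rcases hf : s.findIdx? (fun r => r.headD "" == artist) with _ | j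
        · exfalso
          have hfalse := List.findIdx?_eq_none_iff.1 hf (s[mid.toNat]'hmltn) (List.getElem_mem hmltn)
          rw [hkey] at hfalse
          simp at hfalse
        · obtain ⟨hjlt, hpj, -⟩ := List.findIdx?_eq_some_iff_getElem.1 hf
          have hjm : j = mid.toNat := pv_uniq_idx _ s hc j mid.toNat hjlt hmltn hpj hkey
          simp only [pvLoopA, hlr, ← hmiddef, hget, hkey, if_pos]
          rw [hf, hjm]
          exact hmnat.symm
      · by_cases hlt : (s[mid.toNat]'hmltn).headD "" < artist
        · -- go right
          have hstep : pvLoopA s artist left right (fuel + 1) =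
              pvLoopA s artist (mid + 1) right fuel := by
            simp only [pvLoopA, hlr, ← hmiddef, hget, hkey, hlt, if_pos]
            simp
          rw [hstep]
          apply ih (mid + 1) right (by omega) hlen
          · intro k hk hak
            obtain ⟨hk1, hk2⟩ := hconf k hk hak
            refine ⟨?_, hk2⟩
            by_contra hcon
            have hkm : k ≤ mid.toNat := by omega
            have := hmono k mid.toNat hkm hmltn
            rw [hak] at this
            exact absurd (lt_of_le_of_lt this hlt) (lt_irrefl _)
          · omega
        · -- go left
          have hge : artist ≤ (s[mid.toNat]'hmltn).headD "" := le_of_not_gt hlt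
          have hstep : pvLoopA s artist left right (fuel + 1) =
              pvLoopA s artist left (mid - 1) fuel := by
            simp only [pvLoopA, hlr, if_true, ← hmiddef, hget]
            have h1 : ¬s[mid.toNat].head?.getD "" = artist := by simpa using hkey
            have h2 : ¬(s[mid.toNat].head?.getD "").toList < artist.toList := by simpa using hlt
            simp [h1, h2]
          rw [hstep]
          apply ih left (mid - 1) h0 (by omega)
          · intro k hk hak
            obtain ⟨hk1, hk2⟩ := hconf k hk hak
            refine ⟨hk1, ?_⟩
            by_contra hcon
            have hkm : mid.toNat ≤ k := by omega
            have := hmono mid.toNat k hkm hk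
            rw [hak] at this
            have heq2 : (s[mid.toNat]'hmltn).headD "" = artist := le_antisymm this hge
            exact hkey (by simpa using heq2)
          · omega
    · rcases hf : s.findIdx? (fun r => r.headD "" == artist) with _ | j
      · simp only [pvLoopA, hf]
        rw [if_neg hlr]
      · exfalso
        obtain ⟨hjlt, hpj, -⟩ := List.findIdx?_eq_some_iff_getElem.1 hf
        have := hconf j hjlt (by simpa using hpj)
        omega

-- ===== VERDICT (by name: the statement is the Claim_ definition above) =====
theorem biSearchArtist_spec : Claim_equal_biSearchArtist := by
  intro arr artist hdom hpre
  obtain ⟨hne, hcnt⟩ := hpre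
  unfold Spec_biSearchArtist biSearchArtist biSearchArtist_alt
  set s := PySem.List.sorted arr (fun x => x.headD "") false with hs
  have hcs : s.countP (fun r => r.headD "" == artist) ≤ 1 := by
    rw [(PySem.List.sorted_perm arr (fun x => x.headD "") false).countP_eq]
    exact hcnt
  rw [pvScanB_eq_findIdx]
  rw [pvLoopA_eq s artist
      (fun p q hpq hq => PySem.List.key_sorted_getElem_mono arr (fun x => x.headD "") hpq hq)
      hcs (s.length + 1) 0 ((s.length : Int) - 1) le_rfl le_rfl
      (fun k hk _ => ⟨by omega, by omega⟩) (by omega)]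
  rcases hf : s.findIdx? (fun r => r.headD "" == artist) with _ | j
  · rw [hf]
  · rw [hf]
    simp
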